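-- pv_equiv track=rewrite | github.com/JuhiSrivastava/Algorithmic-Toolbox | C1 - Week6/partition3.py | CheckComb
-- ===== SOURCE A (Python) =====
-- def CheckComb(c,items):
--     for i in range(len(c)):
--         for j in range(i+1,len(c)):
--             for k in range(j+1,len(c)):
--                 if len(c[i]) + len(c[j])+ len(c[k]) == items:
--                     if len(list(set(c[i]).intersection(c[j]))) == 0 and len(list(set(c[j]).intersection(c[k]))) == 0:
--                         return 1
--     return 0
-- ===== SOURCE B (Python) =====
-- def CheckComb(c, items):
--     n = len(c)
--     for j in range(n):
--         sj = set(c[j])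
--         left = {len(c[i]) for i in range(j) if sj.isdisjoint(c[i])}
--         for k in range(j + 1, n):
--             if sj.isdisjoint(c[k]) and items - len(c[j]) - len(c[k]) in left:
--                 return 1
--     return 0
-- ===== Notes on version B (the rewrite author's own statement) =====
-- stated objective: faster
-- what changed: B pivots on the middle index j, precomputing a set of admissible left lengths (lengths of c[i], i<j, disjoint from c[j]) and testing membership of items-len(c[j])-len(c[k]) for each k>j, replacing A's triple nested scan.
import Mathlib
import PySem

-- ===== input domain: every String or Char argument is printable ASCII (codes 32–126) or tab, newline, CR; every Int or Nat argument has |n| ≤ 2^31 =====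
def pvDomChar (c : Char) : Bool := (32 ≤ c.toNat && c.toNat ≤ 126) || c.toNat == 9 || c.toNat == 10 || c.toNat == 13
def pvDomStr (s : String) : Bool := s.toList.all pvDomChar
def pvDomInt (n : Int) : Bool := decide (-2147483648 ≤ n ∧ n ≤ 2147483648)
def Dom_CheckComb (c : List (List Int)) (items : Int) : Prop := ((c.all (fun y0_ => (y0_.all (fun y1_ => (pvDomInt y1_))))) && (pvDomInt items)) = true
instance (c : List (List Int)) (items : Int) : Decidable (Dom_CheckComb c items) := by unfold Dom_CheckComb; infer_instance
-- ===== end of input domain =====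

-- B replaces A's triple nested scan by a pivot on the middle index j with a precomputed
-- set of admissible left lengths (faster: O(n^2·s) instead of O(n^3·s)).

-- ===== PORT A =====
-- triple nested for-loops with early 'return 1'; 'any' over index ranges is the early return
def CheckComb (c : List (List Int)) (items : Int) : Int :=
  if (List.range c.length).any (fun i =>
      (List.range' (i+1) (c.length - (i+1))).any (fun j =>
        (List.range' (j+1) (c.length - (j+1))).any (fun k =>
          decide (((c.getD i []).length : Int) + ((c.getD j []).length : Int) + ((c.getD k []).length : Int) = items) &&
          (decide ((PySem.Set.inter (PySem.Set.ofList (c.getD i [])) (c.getD j [])).length = 0) &&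
           decide ((PySem.Set.inter (PySem.Set.ofList (c.getD j [])) (c.getD k [])).length = 0)))))
  then 1 else 0

-- ===== PORT B =====
def CheckComb_alt (c : List (List Int)) (items : Int) : Int :=
  if (List.range c.length).any (fun j =>
      let sj : PySem.Set Int := PySem.Set.ofList (c.getD j [])
      let left : PySem.Set Int := PySem.Set.ofList
        (((List.range j).filter (fun i => PySem.Set.isdisjoint sj (c.getD i []))).map
          (fun i => ((c.getD i []).length : Int)))
      (List.range' (j+1) (c.length - (j+1))).any (fun k =>
        PySem.Set.isdisjoint sj (c.getD k []) &&
        PySem.Set.contains left (items - ((c.getD j []).length : Int) - ((c.getD k []).length : Int))))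
  then 1 else 0

-- ===== PRECONDITION & SPEC =====
def Spec_CheckComb (c : List (List Int)) (items : Int) (out : Int) : Prop := out = CheckComb_alt c items
instance (c : List (List Int)) (items : Int) (out : Int) : Decidable (Spec_CheckComb c items out) := by unfold Spec_CheckComb; infer_instance

-- ===== CLAIM (what is proved, stated in full; the proofs are below) =====
def Claim_equal_CheckComb : Prop := ∀ (c : List (List Int)) (items : Int), Dom_CheckComb c items → Spec_CheckComb c items (CheckComb c items)

-- ===== LEMMAS AND PROOFS =====

-- the (symmetric) disjointness proposition both conditions express
theorem pv_disj_comm (xs ys : List Int) :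
    (∀ x ∈ xs, x ∉ ys) ↔ (∀ x ∈ ys, x ∉ xs) := by
  constructor <;> intro h x hx hy <;> exact h x hy hx

-- set(xs).inter ys has length 0 iff xs and ys share no element
theorem pv_inter_len_zero (xs ys : List Int) :
    (PySem.Set.inter (PySem.Set.ofList xs) ys).length = 0 ↔ ∀ x ∈ xs, x ∉ ys := by
  rw [List.length_eq_zero_iff, List.eq_nil_iff_forall_not_mem]
  constructor
  · intro h x hx hy
    exact h x (by simp [PySem.Set.mem_inter, PySem.Set.mem_ofList, hx, hy])
  · intro h x hx
    rw [PySem.Set.mem_inter, PySem.Set.mem_ofList] at hx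
    exact h x hx.1 hx.2

theorem CheckComb_spec : Claim_equal_CheckComb := by
  intro c items _
  unfold Spec_CheckComb CheckComb CheckComb_alt
  set n := c.length with hn
  have hb :
      (List.range n).any (fun i =>
        (List.range' (i+1) (n - (i+1))).any (fun j =>
          (List.range' (j+1) (n - (j+1))).any (fun k =>
            decide (((c.getD i []).length : Int) + ((c.getD j []).length : Int) + ((c.getD k []).length : Int) = items) &&
            (decide ((PySem.Set.inter (PySem.Set.ofList (c.getD i [])) (c.getD j [])).length = 0) &&
             decide ((PySem.Set.inter (PySem.Set.ofList (c.getD j [])) (c.getD k [])).length = 0)))))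
      =
      (List.range n).any (fun j =>
        let sj : PySem.Set Int := PySem.Set.ofList (c.getD j [])
        let left : PySem.Set Int := PySem.Set.ofList
          (((List.range j).filter (fun i => PySem.Set.isdisjoint sj (c.getD i []))).map
            (fun i => ((c.getD i []).length : Int)))
        (List.range' (j+1) (n - (j+1))).any (fun k =>
          PySem.Set.isdisjoint sj (c.getD k []) &&
          PySem.Set.contains left (items - ((c.getD j []).length : Int) - ((c.getD k []).length : Int)))) := by
    rw [Bool.eq_iff_iff]
    simp only [List.any_eq_true, Bool.and_eq_true, decide_eq_true_eq, List.mem_range,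
      List.mem_range'_1, PySem.Set.isdisjoint_iff, PySem.Set.contains_iff, PySem.Set.mem_ofList,
      List.mem_map, List.mem_filter, pv_inter_len_zero]
    constructor
    · rintro ⟨i, hi, j, ⟨hij, hj⟩, k, ⟨hjk, hk⟩, hsum, hdij, hdjk⟩
      exact ⟨j, by omega, k, ⟨hjk, hk⟩, hdjk, i,
        ⟨⟨by omega, (pv_disj_comm _ _).mp hdij⟩, by omega⟩⟩
    · rintro ⟨j, hj, k, ⟨hjk, hk⟩, hdjk, i, ⟨⟨hij, hdij⟩, hlen⟩⟩
      exact ⟨i, by omega, j, ⟨by omega, by omega⟩, k, ⟨hjk, hk⟩,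
        by omega, (pv_disj_comm _ _).mp hdij, hdjk⟩
  rw [hb]
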